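-- pv_equiv track=rewrite | github.com/Elderguard/python_basico_pt | Avaliacao/04.teste_manipular_arquivo.py | remover_espacos_da_lista
-- ===== SOURCE A (Python) =====
-- def remover_espacos_da_lista(lista):
--     filtragem_listas_vazias = []                                        # Cria uma variável local 'filtragem_listas_vazias' do tipo lista, vazia
--     filtragem_vazios = []                                               # Cria uma variável local 'filtragem_vazios' do tipo lista, vazia
--
--     for i in range(len(lista)):                                         # Realiza uma iteração para localizar listas de valor não vazio e atribui à lista 'filtragem_listas_vazias'
--         lista_vazia = ['']
--         if lista[i] != lista_vazia:
--             filtragem_listas_vazias.append(lista[i])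
--
--     for i in range(len(filtragem_listas_vazias)):                       # Realiza uma iteração para localizar valores não vazios na lista aninhada e atribui à lista 'filtragem_vazios'
--         vazio = ''
--         pequena_lista = []
--         for j in range(len(filtragem_listas_vazias[i])):
--             if filtragem_listas_vazias[i][j] != vazio:
--                 pequena_lista.append(filtragem_listas_vazias[i][j])
--         filtragem_vazios.append(pequena_lista)
--
--     return(filtragem_vazios)                                            # Retorna o valor de 'filtragem_vazios'
-- ===== SOURCE B (Python) =====
-- def remover_espacos_da_lista(lista):
--     # Recursive decomposition: process the head, recurse on the tail,
--     # build the result by prepending (no index loops, no intermediate list).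
--     if not lista:
--         return []
--     cauda = remover_espacos_da_lista(lista[1:])
--     cabeca = lista[0]
--     if cabeca == ['']:
--         return cauda
--     return [_limpa(cabeca)] + cauda
--
-- def _limpa(sub):
--     # Recursively drop empty strings from one sublist.
--     if not sub:
--         return []
--     resto = _limpa(sub[1:])
--     if sub[0] == '':
--         return resto
--     return [sub[0]] + resto
-- ===== Notes on version B (the rewrite author's own statement) =====
-- stated objective: alternative
-- what changed: Replaces A's two staged index-based loops with an intermediate list by a structural recursion on the list (and a recursive helper per sublist) that builds the result back-to-front by prepending.
import Mathlib
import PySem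

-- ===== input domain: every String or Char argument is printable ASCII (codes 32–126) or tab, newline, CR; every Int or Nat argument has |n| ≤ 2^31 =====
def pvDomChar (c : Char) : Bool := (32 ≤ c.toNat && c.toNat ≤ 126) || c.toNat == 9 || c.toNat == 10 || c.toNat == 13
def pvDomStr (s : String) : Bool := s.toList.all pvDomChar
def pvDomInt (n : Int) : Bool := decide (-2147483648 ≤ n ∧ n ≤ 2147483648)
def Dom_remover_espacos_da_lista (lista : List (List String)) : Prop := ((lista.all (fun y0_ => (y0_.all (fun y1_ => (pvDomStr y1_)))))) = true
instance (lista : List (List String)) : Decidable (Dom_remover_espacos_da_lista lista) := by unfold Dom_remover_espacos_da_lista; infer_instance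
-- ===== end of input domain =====

-- B replaces A's two staged index loops (intermediate list) by a structural recursion that builds the result by prepending; objective: alternative.

-- ===== PORT A =====
-- A: first loop builds filtragem_listas_vazias (sublists ≠ ['']), second loop rebuilds each kept sublist without '' entries.
def remover_espacos_da_lista (lista : List (List String)) : List (List String) :=
  let filtragem_listas_vazias :=
    lista.foldl (fun acc x => if x ≠ [""] then acc ++ [x] else acc) []
  filtragem_listas_vazias.foldl
    (fun acc sub =>
      acc ++ [sub.foldl (fun pequena s => if s ≠ "" then pequena ++ [s] else pequena) []]) []

-- ===== PORT B =====
-- B's recursive helper _limpa: drop '' from one sublist, recursing on the tail.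
def pvLimpa : List String → List String
  | [] => []
  | s :: t => if s = "" then pvLimpa t else s :: pvLimpa t

-- B: structural recursion on lista; skip [''] heads, prepend the cleaned head otherwise.
def remover_espacos_da_lista_alt : List (List String) → List (List String)
  | [] => []
  | cabeca :: resto =>
    if cabeca = [""] then remover_espacos_da_lista_alt resto
    else pvLimpa cabeca :: remover_espacos_da_lista_alt resto

-- ===== PRECONDITION & SPEC =====
def Spec_remover_espacos_da_lista (lista : List (List String)) (out : List (List String)) : Prop := out = remover_espacos_da_lista_alt lista
instance (lista : List (List String)) (out : List (List String)) : Decidable (Spec_remover_espacos_da_lista lista out) := by unfold Spec_remover_espacos_da_lista; infer_instance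

-- ===== CLAIM =====
def Claim_equal_remover_espacos_da_lista : Prop := ∀ (lista : List (List String)), Dom_remover_espacos_da_lista lista → Spec_remover_espacos_da_lista lista (remover_espacos_da_lista lista)

-- ===== LEMMAS AND PROOFS =====

-- A's first loop is a filter.
theorem pv_loop1_eq (lista : List (List String)) (acc : List (List String)) :
    lista.foldl (fun acc x => if x ≠ [""] then acc ++ [x] else acc) acc
      = acc ++ lista.filter (fun x => x ≠ [""]) := by
  induction lista generalizing acc with
  | nil => simp
  | cons h t ih =>
    rw [List.foldl_cons, ih]
    by_cases hh : h = [""] <;> simp [hh]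

-- A's inner loop is a filter.
theorem pv_inner_eq (sub : List String) (acc : List String) :
    sub.foldl (fun pequena s => if s ≠ "" then pequena ++ [s] else pequena) acc
      = acc ++ sub.filter (fun x => x ≠ "") := by
  induction sub generalizing acc with
  | nil => simp
  | cons h t ih =>
    rw [List.foldl_cons, ih]
    by_cases hh : h = "" <;> simp [hh]

-- A's second loop is a map of the inner filter.
theorem pv_loop2_eq (l : List (List String)) (acc : List (List String)) :
    l.foldl (fun acc sub =>
        acc ++ [sub.foldl (fun pequena s => if s ≠ "" then pequena ++ [s] else pequena) []]) acc
      = acc ++ l.map (fun sub => sub.filter (fun x => x ≠ "")) := by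
  induction l generalizing acc with
  | nil => simp
  | cons h t ih =>
    rw [List.foldl_cons, ih, pv_inner_eq]
    simp

-- B's helper is the same filter.
theorem pvLimpa_eq (sub : List String) : pvLimpa sub = sub.filter (fun x => x ≠ "") := by
  induction sub with
  | nil => rfl
  | cons h t ih => by_cases hh : h = "" <;> simp [pvLimpa, hh, ih]

-- B's recursion is the same map-after-filter.
theorem pv_alt_eq (lista : List (List String)) :
    remover_espacos_da_lista_alt lista
      = (lista.filter (fun x => x ≠ [""])).map (fun sub => sub.filter (fun x => x ≠ "")) := by
  induction lista with
  | nil => rfl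
  | cons h t ih =>
    by_cases hh : h = [""] <;> simp [remover_espacos_da_lista_alt, hh, ih, pvLimpa_eq]

-- ===== VERDICT =====
theorem remover_espacos_da_lista_spec : Claim_equal_remover_espacos_da_lista := by
  intro lista _
  unfold Spec_remover_espacos_da_lista remover_espacos_da_lista
  rw [pv_loop1_eq, pv_loop2_eq, pv_alt_eq]
  simp
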